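-- pv_equiv track=rewrite | github.com/fnathas/Tucil1_13522145 | src/read.py | generate_strict_combinations
-- ===== SOURCE A (Python) =====
-- from collections import deque
--
-- def generate_strict_combinations(matrix, step):
--     rows, cols = len(matrix), len(matrix[0])
--     all_paths = []
--
--     # Queue for the paths to explore, each entry is a tuple with the current path and the remaining steps
--     queue = deque(
--         ([(matrix[0][x], (x, 0))], step - 1, "vertical", {(x, 0)})
--         for x in range(cols)
--     )
--
--     while queue:
--         path, steps, direction, visited = queue.popleft()
--
--         if steps == 0:
--             all_paths.append(path)
--             continue
--
--         x, y = path[-1][1]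
--
--         if direction == "vertical":
--             for next_y in range(rows):
--                 if (x, next_y) not in visited:
--                     queue.append(
--                         (
--                             path + [(matrix[next_y][x], (x, next_y))],
--                             steps - 1,
--                             "horizontal",
--                             visited | {(x, next_y)},
--                         )
--                     )
--         else:  # horizontal
--             for next_x in range(cols):
--                 if (next_x, y) not in visited:
--                     queue.append(
--                         (
--                             path + [(matrix[y][next_x], (next_x, y))],
--                             steps - 1,
--                             "vertical",
--                             visited | {(next_x, y)},
--                         )
--                     )
--
--     return all_paths
-- ===== SOURCE B (Python) =====
-- def generate_strict_combinations(matrix, step):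
--     # DFS backtracking with a shared mutable path/visited; copies only completed
--     # paths. Since BFS completions all occur at the same depth, this yields A's
--     # exact output order.
--     rows, cols = len(matrix), len(matrix[0])
--     all_paths = []
--     path = []
--     visited = set()
--
--     def dfs(x, y, steps, vertical):
--         if steps == 0:
--             all_paths.append(path.copy())
--             return
--         if steps < 0:
--             return
--         if vertical:
--             for ny in range(rows):
--                 if (x, ny) not in visited:
--                     visited.add((x, ny))
--                     path.append((matrix[ny][x], (x, ny)))
--                     dfs(x, ny, steps - 1, False)
--                     path.pop()
--                     visited.remove((x, ny))
--         else:
--             for nx in range(cols):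
--                 if (nx, y) not in visited:
--                     visited.add((nx, y))
--                     path.append((matrix[y][nx], (nx, y)))
--                     dfs(nx, y, steps - 1, True)
--                     path.pop()
--                     visited.remove((nx, y))
--
--     for x in range(cols):
--         visited.add((x, 0))
--         path.append((matrix[0][x], (x, 0)))
--         dfs(x, 0, step - 1, True)
--         path.pop()
--         visited.remove((x, 0))
--     return all_paths
-- ===== Notes on version B (the rewrite author's own statement) =====
-- stated objective: alternative
-- what changed: A's breadth-first queue, which copies the whole path list and visited set at every expanded node, is replaced by depth-first backtracking with one shared mutable path/visited that copies only completed paths; since all completed paths occur at the same depth, the BFS output order coincides with DFS order, so the result is identical.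
import Mathlib
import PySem

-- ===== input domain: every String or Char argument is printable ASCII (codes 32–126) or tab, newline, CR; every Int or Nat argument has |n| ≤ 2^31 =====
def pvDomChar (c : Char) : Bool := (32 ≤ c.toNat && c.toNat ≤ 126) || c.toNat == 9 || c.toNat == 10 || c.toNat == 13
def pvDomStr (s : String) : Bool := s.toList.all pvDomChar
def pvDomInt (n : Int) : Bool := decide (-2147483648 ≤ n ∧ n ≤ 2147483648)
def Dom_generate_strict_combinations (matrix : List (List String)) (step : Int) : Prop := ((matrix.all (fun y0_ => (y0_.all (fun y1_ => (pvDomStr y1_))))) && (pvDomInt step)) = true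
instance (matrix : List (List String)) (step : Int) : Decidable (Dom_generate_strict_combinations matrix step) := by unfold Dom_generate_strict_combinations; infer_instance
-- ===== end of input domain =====

-- B replaces A's breadth-first queue (which copies the whole path and visited set at every
-- node) by depth-first backtracking that copies only completed paths; since all completed
-- paths sit at the same depth, the output order is identical.  Objective: alternative.

-- ===== PORT A =====

-- matrix[y][x]; the `getD ""` default is a totality guard only reached on inputs excluded by Pre_
def pvIdx (matrix : List (List String)) (y x : Int) : String :=
  ((PySem.List.pyGet? matrix y).bind (fun row => PySem.List.pyGet? row x)).getD ""

-- a queue entry: (path, steps, direction, visited)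
abbrev pvEntry := List (String × (Int × Int)) × Int × String × PySem.Set (Int × Int)

-- the for-loops that append the successor entries of the popped entry to the queue
def pvKids (matrix : List (List String)) (rows cols : Int)
    (path : List (String × (Int × Int))) (steps : Int) (dir : String)
    (visited : PySem.Set (Int × Int)) (x y : Int) : List pvEntry :=
  if dir == "vertical" then
    (PySem.List.pyRange 0 rows 1).filterMap (fun ny =>
      if PySem.Set.contains visited (x, ny) then none
      else some (path ++ [(pvIdx matrix ny x, (x, ny))], steps - 1, "horizontal",
                 PySem.Set.add visited (x, ny)))
  else
    (PySem.List.pyRange 0 cols 1).filterMap (fun nx =>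
      if PySem.Set.contains visited (nx, y) then none
      else some (path ++ [(pvIdx matrix y nx, (nx, y))], steps - 1, "vertical",
                 PySem.Set.add visited (nx, y)))

-- the `while queue:` loop; fuel is a totality guard (generate_strict_combinations passes enough)
def pvLoopA (matrix : List (List String)) (rows cols : Int) :
    Nat → List pvEntry → List (List (String × (Int × Int))) → List (List (String × (Int × Int)))
  | 0, _, acc => acc
  | _ + 1, [], acc => acc
  | fuel + 1, (path, steps, dir, visited) :: q, acc =>
    if steps = 0 then pvLoopA matrix rows cols fuel q (acc ++ [path])
    else
      match PySem.List.pyGet? path (-1) with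
      | none => pvLoopA matrix rows cols fuel q acc   -- `path[-1]` IndexError: unreachable from the real initial queue
      | some (_, (x, y)) =>
        pvLoopA matrix rows cols fuel
          (q ++ pvKids matrix rows cols path steps dir visited x y) acc

-- fuel that provably outlasts the loop
def pvFuelA (matrix : List (List String)) : Nat :=
  (matrix.length * (matrix.headD []).length + 1) ^ (matrix.length * (matrix.headD []).length + 1)

def generate_strict_combinations (matrix : List (List String)) (step : Int) :
    List (List (String × (Int × Int))) :=
  let rows : Int := matrix.length
  let cols : Int := (matrix.headD []).length   -- len(matrix[0]); matrix = [] is excluded by Pre_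
  let queue : List pvEntry :=
    (PySem.List.pyRange 0 cols 1).map (fun x =>
      ([(pvIdx matrix 0 x, (x, (0 : Int)))], step - 1, "vertical",
       PySem.Set.add PySem.Set.empty (x, (0 : Int))))
  pvLoopA matrix rows cols (pvFuelA matrix) queue []

-- ===== PORT B =====

-- depth-first backtracking; prunes a negative budget immediately
def pvDfsB (matrix : List (List String)) (rows cols : Int) (x y steps : Int) (vertical : Bool)
    (visited : PySem.Set (Int × Int)) (path : List (String × (Int × Int))) :
    List (List (String × (Int × Int))) :=
  if steps = 0 then [path]
  else if steps < 0 then []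
  else if vertical then
    (PySem.List.pyRange 0 rows 1).flatMap (fun ny =>
      if PySem.Set.contains visited (x, ny) then []
      else pvDfsB matrix rows cols x ny (steps - 1) false (PySem.Set.add visited (x, ny))
             (path ++ [(pvIdx matrix ny x, (x, ny))]))
  else
    (PySem.List.pyRange 0 cols 1).flatMap (fun nx =>
      if PySem.Set.contains visited (nx, y) then []
      else pvDfsB matrix rows cols nx y (steps - 1) true (PySem.Set.add visited (nx, y))
             (path ++ [(pvIdx matrix y nx, (nx, y))]))
  termination_by steps.toNat
  decreasing_by all_goals omega

def generate_strict_combinations_alt (matrix : List (List String)) (step : Int) :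
    List (List (String × (Int × Int))) :=
  let rows : Int := matrix.length
  let cols : Int := (matrix.headD []).length
  (PySem.List.pyRange 0 cols 1).flatMap (fun x =>
    pvDfsB matrix rows cols x 0 (step - 1) true
      (PySem.Set.add PySem.Set.empty (x, (0 : Int)))
      [(pvIdx matrix 0 x, (x, (0 : Int)))])

-- ===== PRECONDITION & SPEC =====
-- Pre_ excludes exactly the inputs where Python A raises: matrix = [] (len(matrix[0]) IndexError),
-- and matrices with a row shorter than row 0 when step ≠ 1 (matrix[ny][x] IndexError during expansion).
def Pre_generate_strict_combinations (matrix : List (List String)) (step : Int) : Prop :=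
  matrix ≠ [] ∧ (step = 1 ∨ ∀ row ∈ matrix, (matrix.headD []).length ≤ row.length)
instance (matrix : List (List String)) (step : Int) : Decidable (Pre_generate_strict_combinations matrix step) := by unfold Pre_generate_strict_combinations; infer_instance

def pvWitness_generate_strict_combinations : List (List String) × Int := ([["a", "b"], ["c", "d"]], 2)

def Spec_generate_strict_combinations (matrix : List (List String)) (step : Int) (out : List (List (String × (Int × Int)))) : Prop := out = generate_strict_combinations_alt matrix step
instance (matrix : List (List String)) (step : Int) (out : List (List (String × (Int × Int)))) : Decidable (Spec_generate_strict_combinations matrix step out) := by unfold Spec_generate_strict_combinations; infer_instance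

-- ===== CLAIM (what is proved, stated in full; the proofs are below) =====
def Claim_equal_generate_strict_combinations : Prop := ∀ (matrix : List (List String)) (step : Int), Dom_generate_strict_combinations matrix step → Pre_generate_strict_combinations matrix step → Spec_generate_strict_combinations matrix step (generate_strict_combinations matrix step)


-- ===== LEMMAS AND PROOFS =====

theorem pvDfs_zero (matrix : List (List String)) (rows cols x y : Int) (v : Bool)
    (vis : PySem.Set (Int × Int)) (p : List (String × (Int × Int))) :
    pvDfsB matrix rows cols x y 0 v vis p = [p] := by
  rw [pvDfsB]; simp

theorem pvDfs_neg (matrix : List (List String)) (rows cols x y steps : Int) (v : Bool)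
    (vis : PySem.Set (Int × Int)) (p : List (String × (Int × Int)))
    (h : steps < 0) : pvDfsB matrix rows cols x y steps v vis p = [] := by
  rw [pvDfsB]; simp [h, show steps ≠ 0 by omega]

-- the grid cells
def pvGrid (rows cols : Int) : List (Int × Int) :=
  (PySem.List.pyRange 0 cols 1).flatMap (fun x => (PySem.List.pyRange 0 rows 1).map (fun y => (x, y)))

-- number of unvisited grid cells
def pvU (rows cols : Int) (visited : PySem.Set (Int × Int)) : Nat :=
  (pvGrid rows cols).countP (fun c => !(PySem.Set.contains visited c))

def pvB0 (rows cols : Int) : Nat := (rows * cols).toNat + 1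

-- potential of a queue
def pvMu (rows cols : Int) (q : List pvEntry) : Nat :=
  (q.map (fun e => pvB0 rows cols ^ pvU rows cols e.2.2.2)).sum

-- invariant: last path element exists and its coordinates are in range
def pvInv (rows cols : Int) (e : pvEntry) : Prop :=
  ∃ v x y, PySem.List.pyGet? e.1 (-1) = some (v, (x, y)) ∧ 0 ≤ x ∧ x < cols ∧ 0 ≤ y ∧ y < rows

-- DFS value of a queue entry
def pvE (matrix : List (List String)) (rows cols : Int) (e : pvEntry) :
    List (List (String × (Int × Int))) :=
  if e.2.1 = 0 then [e.1]
  else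
    match PySem.List.pyGet? e.1 (-1) with
    | some (_, (x, y)) => pvDfsB matrix rows cols x y e.2.1 (e.2.2.1 == "vertical") e.2.2.2 e.1
    | none => []

theorem pvGrid_nodup (rows cols : Int) : (pvGrid rows cols).Nodup := by
  unfold pvGrid
  rw [List.nodup_flatMap]
  refine ⟨fun x _ => List.Nodup.map ?_ (PySem.List.nodup_pyRange_one 0 rows), ?_⟩
  · intro a b h; simpa using h
  · refine (PySem.List.nodup_pyRange_one 0 cols).imp ?_
    intro a b hne z hza hzb
    simp only [List.mem_map] at hza hzb
    obtain ⟨y1, _, rfl⟩ := hza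
    obtain ⟨y2, _, h⟩ := hzb
    exact hne (by simpa using congrArg Prod.fst h.symm)

theorem pvMem_grid (rows cols : Int) (c : Int × Int) :
    c ∈ pvGrid rows cols ↔ 0 ≤ c.1 ∧ c.1 < cols ∧ 0 ≤ c.2 ∧ c.2 < rows := by
  unfold pvGrid
  simp only [List.mem_flatMap, List.mem_map, PySem.List.mem_pyRange_one]
  constructor
  · rintro ⟨x, ⟨h1, h2⟩, y, ⟨h3, h4⟩, rfl⟩; exact ⟨h1, h2, h3, h4⟩
  · rintro ⟨h1, h2, h3, h4⟩; exact ⟨c.1, ⟨h1, h2⟩, c.2, ⟨h3, h4⟩, rfl⟩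

theorem pvCountP_erase {α : Type} [BEq α] [LawfulBEq α] (p : α → Bool) :
    ∀ (l : List α) (c : α), l.Nodup → c ∈ l → p c = true →
      l.countP (fun a => p a && !(a == c)) + 1 = l.countP p := by
  intro l c hnd hmem hp
  induction l with
  | nil => simp at hmem
  | cons a l ih =>
    rcases List.mem_cons.1 hmem with rfl | hmem'
    · have hnotin : c ∉ l := (List.nodup_cons.1 hnd).1
      have hcong : l.countP (fun x => p x && !(x == c)) = l.countP p := by
        apply List.countP_congr
        intro x hx
        have hxc : x ≠ c := fun h => hnotin (h ▸ hx)
        simp [hxc]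
      simp [List.countP_cons, hp, hcong]
    · have hne : a ≠ c := by
        rintro rfl; exact (List.nodup_cons.1 hnd).1 hmem'
      have ih' := ih (List.nodup_cons.1 hnd).2 hmem'
      simp only [List.countP_cons]
      have : (p a && !(a == c)) = p a := by simp [hne]
      rw [this]
      omega

theorem pvContains_append_singleton {α : Type} [BEq α] [LawfulBEq α]
    (s : PySem.Set α) (c a : α) :
    PySem.Set.contains (s ++ [c]) a = (PySem.Set.contains s a || a == c) := by
  rw [← Bool.coe_iff_coe]
  rw [PySem.Set.contains_iff]
  rw [Bool.or_eq_true, PySem.Set.contains_iff, beq_iff_eq]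
  simp

theorem pvU_add (rows cols : Int) (visited : PySem.Set (Int × Int)) (c : Int × Int)
    (hc : c ∈ pvGrid rows cols) (hn : PySem.Set.contains visited c = false) :
    pvU rows cols (PySem.Set.add visited c) + 1 = pvU rows cols visited := by
  unfold pvU
  have hnm : c ∉ visited := by
    intro h
    rw [(PySem.Set.contains_iff visited c).2 h] at hn
    simp at hn
  rw [PySem.Set.add_of_not_mem hnm]
  have hcongr : ((pvGrid rows cols).countP fun a => !(PySem.Set.contains (visited ++ [c]) a))
      = (pvGrid rows cols).countP (fun a => (!(PySem.Set.contains visited a)) && !(a == c)) := by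
    apply List.countP_congr
    intro x _
    rw [pvContains_append_singleton]
    simp
  rw [hcongr]
  exact pvCountP_erase _ _ _ (pvGrid_nodup rows cols) hc (by rw [hn]; rfl)

theorem pvOne_le_pow (rows cols : Int) (n : Nat) : 1 ≤ pvB0 rows cols ^ n :=
  Nat.one_le_pow _ _ (by unfold pvB0; omega)

theorem pvMu_append (rows cols : Int) (a b : List pvEntry) :
    pvMu rows cols (a ++ b) = pvMu rows cols a + pvMu rows cols b := by
  simp [pvMu]

theorem pvMu_cons (rows cols : Int) (e : pvEntry) (q : List pvEntry) :
    pvMu rows cols (e :: q) = pvB0 rows cols ^ pvU rows cols e.2.2.2 + pvMu rows cols q := by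
  simp [pvMu]

theorem pvE_zero (matrix : List (List String)) (rows cols : Int) (e : pvEntry)
    (h : e.2.1 = 0) : pvE matrix rows cols e = [e.1] := by
  simp [pvE, h]

theorem pvE_neg (matrix : List (List String)) (rows cols : Int) (e : pvEntry)
    (h : e.2.1 < 0) : pvE matrix rows cols e = [] := by
  unfold pvE
  rw [if_neg (by omega)]
  cases hg : PySem.List.pyGet? e.1 (-1) with
  | none => rfl
  | some p =>
    obtain ⟨v, x, y⟩ := p
    exact pvDfs_neg _ _ _ _ _ _ _ _ _ h

theorem pvE_eq_dfs (matrix : List (List String)) (rows cols : Int)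
    (p : List (String × (Int × Int))) (st : Int) (d : String) (vis : PySem.Set (Int × Int))
    (v : String) (cx cy : Int) (hget : PySem.List.pyGet? p (-1) = some (v, (cx, cy))) :
    pvE matrix rows cols (p, st, d, vis) = pvDfsB matrix rows cols cx cy st (d == "vertical") vis p := by
  unfold pvE
  by_cases h0 : st = 0
  · subst h0; simp [pvDfs_zero]
  · rw [if_neg h0]
    simp only [hget]

theorem pvFlatMap_filterMap {α β γ : Type} (l : List α) (f : α → Option β) (g : β → List γ) :
    (l.filterMap f).flatMap g
      = l.flatMap (fun a => match f a with | some b => g b | none => []) := by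
  induction l with
  | nil => rfl
  | cons a l ih =>
    cases hfa : f a with
    | none => simp [List.filterMap_cons, hfa, ih]
    | some b => simp [List.filterMap_cons, hfa, ih]

-- ---- facts about pvKids ----

theorem pvKids_steps (matrix : List (List String)) (rows cols : Int)
    (path : List (String × (Int × Int))) (st : Int) (d : String)
    (vis : PySem.Set (Int × Int)) (x y : Int) :
    ∀ k ∈ pvKids matrix rows cols path st d vis x y, k.2.1 = st - 1 := by
  intro k hk
  unfold pvKids at hk
  split at hk <;>
  · rcases List.mem_filterMap.1 hk with ⟨a, _, hfa⟩
    split at hfa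
    · cases hfa
    · cases hfa; rfl

theorem pvKids_inv (matrix : List (List String)) (rows cols : Int)
    (path : List (String × (Int × Int))) (st : Int) (d : String)
    (vis : PySem.Set (Int × Int)) (x y : Int)
    (hx1 : 0 ≤ x) (hx2 : x < cols) (hy1 : 0 ≤ y) (hy2 : y < rows) :
    ∀ k ∈ pvKids matrix rows cols path st d vis x y, pvInv rows cols k := by
  intro k hk
  unfold pvKids at hk
  split at hk
  · rcases List.mem_filterMap.1 hk with ⟨a, ha, hfa⟩
    have hmem := PySem.List.mem_pyRange_one.1 ha
    split at hfa
    · cases hfa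
    · cases hfa
      exact ⟨_, x, a, PySem.List.pyGet?_neg_one_append_singleton _ _, hx1, hx2, hmem.1, hmem.2⟩
  · rcases List.mem_filterMap.1 hk with ⟨a, ha, hfa⟩
    have hmem := PySem.List.mem_pyRange_one.1 ha
    split at hfa
    · cases hfa
    · cases hfa
      exact ⟨_, a, y, PySem.List.pyGet?_neg_one_append_singleton _ _, hmem.1, hmem.2, hy1, hy2⟩

theorem pvKids_U (matrix : List (List String)) (rows cols : Int)
    (path : List (String × (Int × Int))) (st : Int) (d : String)
    (vis : PySem.Set (Int × Int)) (x y : Int)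
    (hx1 : 0 ≤ x) (hx2 : x < cols) (hy1 : 0 ≤ y) (hy2 : y < rows) :
    ∀ k ∈ pvKids matrix rows cols path st d vis x y,
      pvU rows cols k.2.2.2 + 1 = pvU rows cols vis := by
  intro k hk
  unfold pvKids at hk
  split at hk
  · rcases List.mem_filterMap.1 hk with ⟨a, ha, hfa⟩
    have hmem := PySem.List.mem_pyRange_one.1 ha
    split at hfa
    · cases hfa
    · next hc =>
      cases hfa
      exact pvU_add rows cols vis (x, a)
        ((pvMem_grid rows cols (x, a)).2 ⟨hx1, hx2, hmem.1, hmem.2⟩)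
        (Bool.not_eq_true _ ▸ Bool.of_not_eq_true hc)
  · rcases List.mem_filterMap.1 hk with ⟨a, ha, hfa⟩
    have hmem := PySem.List.mem_pyRange_one.1 ha
    split at hfa
    · cases hfa
    · next hc =>
      cases hfa
      exact pvU_add rows cols vis (a, y)
        ((pvMem_grid rows cols (a, y)).2 ⟨hmem.1, hmem.2, hy1, hy2⟩)
        (Bool.of_not_eq_true hc)

theorem pvKids_length (matrix : List (List String)) (rows cols : Int)
    (path : List (String × (Int × Int))) (st : Int) (d : String)
    (vis : PySem.Set (Int × Int)) (x y : Int)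
    (hx1 : 0 ≤ x) (hx2 : x < cols) (hy1 : 0 ≤ y) (hy2 : y < rows) :
    (pvKids matrix rows cols path st d vis x y).length ≤ (rows * cols).toNat := by
  unfold pvKids
  split
  · calc ((PySem.List.pyRange 0 rows 1).filterMap _).length
        ≤ (PySem.List.pyRange 0 rows 1).length := List.length_filterMap_le _ _
      _ = (rows - 0).toNat := PySem.List.length_pyRange_one 0 rows
      _ ≤ (rows * cols).toNat := by
          have : rows ≤ rows * cols := by nlinarith
          omega
  · calc ((PySem.List.pyRange 0 cols 1).filterMap _).length
        ≤ (PySem.List.pyRange 0 cols 1).length := List.length_filterMap_le _ _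
      _ = (cols - 0).toNat := PySem.List.length_pyRange_one 0 cols
      _ ≤ (rows * cols).toNat := by
          have : cols ≤ rows * cols := by nlinarith
          omega

theorem pvFlatMap_congr {α β : Type} (l : List α) (f g : α → List β)
    (h : ∀ a ∈ l, f a = g a) : l.flatMap f = l.flatMap g := by
  induction l with
  | nil => rfl
  | cons a l ih =>
    simp only [List.flatMap_cons]
    rw [h a List.mem_cons_self, ih (fun a ha => h a (List.mem_cons_of_mem _ ha))]

theorem pvKids_mu (matrix : List (List String)) (rows cols : Int)
    (path : List (String × (Int × Int))) (st : Int) (d : String)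
    (vis : PySem.Set (Int × Int)) (x y : Int)
    (hx1 : 0 ≤ x) (hx2 : x < cols) (hy1 : 0 ≤ y) (hy2 : y < rows) :
    pvMu rows cols (pvKids matrix rows cols path st d vis x y) + 1
      ≤ pvB0 rows cols ^ pvU rows cols vis := by
  by_cases hnil : pvKids matrix rows cols path st d vis x y = []
  · rw [hnil]
    simpa [pvMu] using pvOne_le_pow rows cols (pvU rows cols vis)
  · obtain ⟨k0, hk0⟩ := List.exists_mem_of_ne_nil _ hnil
    have hU := pvKids_U matrix rows cols path st d vis x y hx1 hx2 hy1 hy2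
    have hU0 := hU k0 hk0
    have hsum : pvMu rows cols (pvKids matrix rows cols path st d vis x y)
        ≤ (pvKids matrix rows cols path st d vis x y).length
          * pvB0 rows cols ^ pvU rows cols k0.2.2.2 := by
      have hb := List.sum_le_card_nsmul
        ((pvKids matrix rows cols path st d vis x y).map
          (fun e => pvB0 rows cols ^ pvU rows cols e.2.2.2))
        (pvB0 rows cols ^ pvU rows cols k0.2.2.2) ?_
      · simpa [pvMu, smul_eq_mul] using hb
      · intro z hz
        rcases List.mem_map.1 hz with ⟨e, he, rfl⟩
        have := hU e he
        have heq : pvU rows cols e.2.2.2 = pvU rows cols k0.2.2.2 := by omega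
        rw [heq]
    have hlen := pvKids_length matrix rows cols path st d vis x y hx1 hx2 hy1 hy2
    have hone : 1 ≤ pvB0 rows cols ^ pvU rows cols k0.2.2.2 :=
      pvOne_le_pow rows cols _
    have hmul : (pvKids matrix rows cols path st d vis x y).length
          * pvB0 rows cols ^ pvU rows cols k0.2.2.2
        ≤ (rows * cols).toNat * pvB0 rows cols ^ pvU rows cols k0.2.2.2 :=
      Nat.mul_le_mul_right _ hlen
    calc pvMu rows cols (pvKids matrix rows cols path st d vis x y) + 1
        ≤ (rows * cols).toNat * pvB0 rows cols ^ pvU rows cols k0.2.2.2 + 1 := by omega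
      _ ≤ (rows * cols).toNat * pvB0 rows cols ^ pvU rows cols k0.2.2.2
            + pvB0 rows cols ^ pvU rows cols k0.2.2.2 := by omega
      _ = pvB0 rows cols * pvB0 rows cols ^ pvU rows cols k0.2.2.2 := by unfold pvB0; ring
      _ = pvB0 rows cols ^ (pvU rows cols k0.2.2.2 + 1) := by rw [pow_succ]; ring
      _ = pvB0 rows cols ^ pvU rows cols vis := by rw [hU0]

theorem pvKids_E (matrix : List (List String)) (rows cols : Int)
    (path : List (String × (Int × Int))) (st : Int) (d : String)
    (vis : PySem.Set (Int × Int)) (v : String) (x y : Int)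
    (hst : st ≠ 0) (hget : PySem.List.pyGet? path (-1) = some (v, (x, y))) :
    pvE matrix rows cols (path, st, d, vis)
      = (pvKids matrix rows cols path st d vis x y).flatMap (pvE matrix rows cols) := by
  rcases lt_or_gt_of_ne hst with hneg | hpos
  · rw [pvE_neg matrix rows cols _ hneg]
    symm
    rw [List.flatMap_eq_nil_iff]
    intro k hk
    exact pvE_neg matrix rows cols k
      (by rw [pvKids_steps matrix rows cols path st d vis x y k hk]; omega)
  · rw [pvE_eq_dfs matrix rows cols path st d vis v x y hget]
    rw [pvDfsB]
    rw [if_neg hst, if_neg (by omega)]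
    unfold pvKids
    by_cases hd : (d == "vertical") = true
    · rw [if_pos hd, if_pos hd, pvFlatMap_filterMap]
      apply pvFlatMap_congr
      intro a _
      by_cases hm : ((x, a) : Int × Int) ∈ vis
      · simp [hm, PySem.Set.contains]
      · simp only [PySem.Set.contains, hm, decide_false, if_false, List.elem_eq_contains,
          List.contains_eq_mem, decide_eq_true_eq]
        norm_num
        show _ = pvE matrix rows cols
          (path ++ [(pvIdx matrix a x, (x, a))], st - 1, "horizontal", vis.add (x, a))
        rw [pvE_eq_dfs matrix rows cols _ _ _ _ _ x a
          (PySem.List.pyGet?_neg_one_append_singleton _ _)]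
        rfl
    · rw [if_neg hd, if_neg hd, pvFlatMap_filterMap]
      apply pvFlatMap_congr
      intro a _
      by_cases hm : ((a, y) : Int × Int) ∈ vis
      · simp [hm, PySem.Set.contains]
      · simp only [PySem.Set.contains, hm, decide_false, if_false, List.elem_eq_contains,
          List.contains_eq_mem, decide_eq_true_eq]
        norm_num
        show _ = pvE matrix rows cols
          (path ++ [(pvIdx matrix y a, (a, y))], st - 1, "vertical", vis.add (a, y))
        rw [pvE_eq_dfs matrix rows cols _ _ _ _ _ a y
          (PySem.List.pyGet?_neg_one_append_singleton _ _)]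
        rfl

theorem pvLoopA_nil (matrix : List (List String)) (rows cols : Int) (fuel : Nat)
    (acc : List (List (String × (Int × Int)))) :
    pvLoopA matrix rows cols fuel [] acc = acc := by
  cases fuel <;> rfl

theorem pvMu_pos (rows cols : Int) (q : List pvEntry) (h : q ≠ []) :
    1 ≤ pvMu rows cols q := by
  cases q with
  | nil => exact absurd rfl h
  | cons e q =>
    rw [pvMu_cons]
    have := pvOne_le_pow rows cols (pvU rows cols e.2.2.2)
    omega

theorem pvLoop_eq (matrix : List (List String)) (rows cols : Int) :
    ∀ (fuel : Nat) (s : Int) (q₁ q₂ : List pvEntry) (acc : List (List (String × (Int × Int)))),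
      (∀ e ∈ q₁, e.2.1 = s) → (∀ e ∈ q₂, e.2.1 = s - 1) →
      (∀ e ∈ q₁ ++ q₂, pvInv rows cols e) →
      pvMu rows cols (q₁ ++ q₂) ≤ fuel →
      pvLoopA matrix rows cols fuel (q₁ ++ q₂) acc
        = acc ++ q₂.flatMap (pvE matrix rows cols) ++ q₁.flatMap (pvE matrix rows cols) := by
  intro fuel
  induction fuel with
  | zero =>
    intro s q₁ q₂ acc h₁ h₂ hinv hmu
    have hnil : q₁ ++ q₂ = [] := by
      by_contra h
      have := pvMu_pos rows cols (q₁ ++ q₂) h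
      omega
    rcases List.append_eq_nil_iff.1 hnil with ⟨rfl, rfl⟩
    simp [pvLoopA]
  | succ fuel ih =>
    intro s q₁ q₂ acc h₁ h₂ hinv hmu
    cases hq₁ : q₁ with
    | nil =>
      subst hq₁
      cases hq₂ : q₂ with
      | nil => subst hq₂; simp [pvLoopA]
      | cons e q₂' =>
        subst hq₂
        obtain ⟨path, st, d, vis⟩ := e
        have hst : st = s - 1 := h₂ _ List.mem_cons_self
        obtain ⟨v, x, y, hget, hx1, hx2, hy1, hy2⟩ :=
          hinv (path, st, d, vis) (by simp)
        simp only [List.nil_append]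
        by_cases h0 : st = 0
        · rw [show pvLoopA matrix rows cols (fuel + 1) ((path, st, d, vis) :: q₂') acc
              = pvLoopA matrix rows cols fuel q₂' (acc ++ [path]) by
            rw [pvLoopA, if_pos h0]]
          have := ih (s - 1) q₂' [] (acc ++ [path])
            (fun e he => h₂ e (List.mem_cons_of_mem _ he)) (by simp)
            (fun e he => hinv e (by simp at he ⊢; tauto))
            (by simp only [List.nil_append] at hmu
                rw [pvMu_cons] at hmu
                have hmu' : pvB0 rows cols ^ pvU rows cols vis + pvMu rows cols q₂' ≤ fuel + 1 := hmu
                simp only [List.append_nil]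
                have := pvOne_le_pow rows cols (pvU rows cols vis); omega)
          simp only [List.append_nil] at this
          rw [this]
          rw [List.flatMap_cons, pvE_zero matrix rows cols _ h0]
          simp
        · rw [show pvLoopA matrix rows cols (fuel + 1) ((path, st, d, vis) :: q₂') acc
              = pvLoopA matrix rows cols fuel
                  (q₂' ++ pvKids matrix rows cols path st d vis x y) acc by
            rw [pvLoopA, if_neg h0, hget]]
          have hkmu := pvKids_mu matrix rows cols path st d vis x y hx1 hx2 hy1 hy2
          have := ih (s - 1) q₂' (pvKids matrix rows cols path st d vis x y) acc
            (fun e he => h₂ e (List.mem_cons_of_mem _ he))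
            (fun k hk => by
              rw [pvKids_steps matrix rows cols path st d vis x y k hk, hst])
            (fun e he => by
              rcases List.mem_append.1 he with he | he
              · exact hinv e (by simp [he])
              · exact pvKids_inv matrix rows cols path st d vis x y hx1 hx2 hy1 hy2 e he)
            (by simp only [List.nil_append] at hmu
                rw [pvMu_cons] at hmu
                have hmu' : pvB0 rows cols ^ pvU rows cols vis + pvMu rows cols q₂' ≤ fuel + 1 := hmu
                rw [pvMu_append]
                omega)
          rw [this]
          rw [List.flatMap_cons,
            pvKids_E matrix rows cols path st d vis v x y h0 hget]
          simp
    | cons e q₁' =>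
      subst hq₁
      obtain ⟨path, st, d, vis⟩ := e
      have hst : st = s := h₁ _ List.mem_cons_self
      obtain ⟨v, x, y, hget, hx1, hx2, hy1, hy2⟩ :=
        hinv (path, st, d, vis) (by simp)
      by_cases h0 : st = 0
      · rw [show ((path, st, d, vis) :: q₁') ++ q₂
            = (path, st, d, vis) :: (q₁' ++ q₂) by simp]
        rw [show pvLoopA matrix rows cols (fuel + 1)
              ((path, st, d, vis) :: (q₁' ++ q₂)) acc
            = pvLoopA matrix rows cols fuel (q₁' ++ q₂) (acc ++ [path]) by
          rw [pvLoopA, if_pos h0]]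
        have := ih s q₁' q₂ (acc ++ [path])
          (fun e he => h₁ e (List.mem_cons_of_mem _ he)) h₂
          (fun e he => hinv e (by simp at he ⊢; tauto))
          (by rw [List.cons_append, pvMu_cons] at hmu
              have hmu' : pvB0 rows cols ^ pvU rows cols vis + pvMu rows cols (q₁' ++ q₂) ≤ fuel + 1 := hmu
              have := pvOne_le_pow rows cols (pvU rows cols vis); omega)
        rw [this]
        have hq₂nil : q₂.flatMap (pvE matrix rows cols) = [] := by
          rw [List.flatMap_eq_nil_iff]
          intro e he
          exact pvE_neg matrix rows cols e (by rw [h₂ e he]; omega)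
        rw [List.flatMap_cons, pvE_zero matrix rows cols _ h0, hq₂nil]
        simp
      · rw [show ((path, st, d, vis) :: q₁') ++ q₂
            = (path, st, d, vis) :: (q₁' ++ q₂) by simp]
        rw [show pvLoopA matrix rows cols (fuel + 1)
              ((path, st, d, vis) :: (q₁' ++ q₂)) acc
            = pvLoopA matrix rows cols fuel
                ((q₁' ++ q₂) ++ pvKids matrix rows cols path st d vis x y) acc by
          rw [pvLoopA, if_neg h0, hget]]
        rw [List.append_assoc]
        have hkmu := pvKids_mu matrix rows cols path st d vis x y hx1 hx2 hy1 hy2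
        have := ih s q₁' (q₂ ++ pvKids matrix rows cols path st d vis x y) acc
          (fun e he => h₁ e (List.mem_cons_of_mem _ he))
          (fun k hk => by
            rcases List.mem_append.1 hk with hk | hk
            · exact h₂ k hk
            · rw [pvKids_steps matrix rows cols path st d vis x y k hk, hst])
          (fun e he => by
            rcases List.mem_append.1 he with he | he
            · exact hinv e (by simp at he ⊢; tauto)
            · rcases List.mem_append.1 he with he | he
              · exact hinv e (by simp [he])
              · exact pvKids_inv matrix rows cols path st d vis x y hx1 hx2 hy1 hy2 e he)
          (by rw [List.cons_append, pvMu_cons] at hmu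
              have hmu' : pvB0 rows cols ^ pvU rows cols vis + pvMu rows cols (q₁' ++ q₂) ≤ fuel + 1 := hmu
              rw [pvMu_append] at hmu'
              rw [pvMu_append, pvMu_append]
              omega)
        rw [this]
        rw [List.flatMap_append, List.flatMap_cons,
          pvKids_E matrix rows cols path st d vis v x y h0 hget]
        simp

-- ===== VERDICT (by name: the statement is the Claim_ definition above) =====
theorem pvGrid_length (rows cols : Int) :
    (pvGrid rows cols).length = cols.toNat * rows.toNat := by
  unfold pvGrid
  rw [List.length_flatMap]
  have : ((PySem.List.pyRange 0 cols 1).map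
      (fun x => ((PySem.List.pyRange 0 rows 1).map (fun y => (x, y))).length))
      = List.replicate (PySem.List.pyRange 0 cols 1).length ((rows - 0).toNat) := by
    rw [List.eq_replicate_iff]
    constructor
    · simp
    · intro b hb
      rcases List.mem_map.1 hb with ⟨a, _, rfl⟩
      rw [List.length_map, PySem.List.length_pyRange_one]
  rw [this, List.sum_replicate, smul_eq_mul, PySem.List.length_pyRange_one]
  simp

theorem generate_strict_combinations_spec : Claim_equal_generate_strict_combinations := by
  intro matrix step _ _
  unfold Spec_generate_strict_combinations
  show pvLoopA matrix (matrix.length) ((matrix.headD []).length) (pvFuelA matrix)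
      ((PySem.List.pyRange 0 ((matrix.headD []).length) 1).map (fun x =>
        ([(pvIdx matrix 0 x, (x, (0 : Int)))], step - 1, "vertical",
         PySem.Set.add PySem.Set.empty (x, (0 : Int))))) []
    = (PySem.List.pyRange 0 ((matrix.headD []).length) 1).flatMap (fun x =>
        pvDfsB matrix (matrix.length) ((matrix.headD []).length) x 0 (step - 1) true
          (PySem.Set.add PySem.Set.empty (x, (0 : Int)))
          [(pvIdx matrix 0 x, (x, (0 : Int)))])
  by_cases h2 : (matrix.headD []).length = 0
  · rw [h2]
    rw [show ((0 : Nat) : Int) = 0 by simp]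
    rw [PySem.List.pyRange_one_eq_nil (le_refl 0)]
    simp [pvLoopA_nil]
  · have hm : matrix ≠ [] := by
      intro h; subst h; simp at h2
    have hL1 : 1 ≤ matrix.length := List.length_pos_iff.2 hm
    set L1 := matrix.length with hL1def
    set L2 := (matrix.headD []).length with hL2def
    set rows : Int := (L1 : Int) with hrows
    set cols : Int := (L2 : Int) with hcols
    set init := ((PySem.List.pyRange 0 cols 1).map (fun x =>
        (([(pvIdx matrix 0 x, (x, (0 : Int)))] : List (String × (Int × Int))), step - 1,
         ("vertical" : String),
         PySem.Set.add PySem.Set.empty (x, (0 : Int))))) with hinit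
    have hB0 : pvB0 rows cols = L1 * L2 + 1 := by
      unfold pvB0
      rw [hrows, hcols, ← Nat.cast_mul, Int.toNat_natCast]
    have hUle : ∀ vis : PySem.Set (Int × Int), pvU rows cols vis ≤ L1 * L2 := by
      intro vis
      calc pvU rows cols vis ≤ (pvGrid rows cols).length := List.countP_le_length
        _ = cols.toNat * rows.toNat := pvGrid_length rows cols
        _ = L1 * L2 := by rw [hrows, hcols]; simp [Nat.mul_comm]
    have h₁ : ∀ e ∈ init, e.2.1 = step - 1 := by
      intro e he
      rcases List.mem_map.1 he with ⟨a, _, rfl⟩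
      rfl
    have hinv : ∀ e ∈ init ++ ([] : List pvEntry), pvInv rows cols e := by
      intro e he
      rw [List.append_nil] at he
      rcases List.mem_map.1 he with ⟨a, ha, rfl⟩
      have hb := PySem.List.mem_pyRange_one.1 ha
      exact ⟨pvIdx matrix 0 a, a, 0, by simp [PySem.List.pyGet?_neg_one],
        hb.1, hb.2, le_refl 0, by rw [hrows]; exact_mod_cast hL1⟩
    have hmu : pvMu rows cols (init ++ []) ≤ pvFuelA matrix := by
      rw [List.append_nil]
      have hfuel : pvFuelA matrix = pvB0 rows cols ^ (L1 * L2 + 1) := by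
        unfold pvFuelA
        rw [hB0, ← hL1def, ← hL2def]
      have hbound : pvMu rows cols init ≤ init.length * pvB0 rows cols ^ (L1 * L2) := by
        have hb := List.sum_le_card_nsmul
          (init.map (fun e => pvB0 rows cols ^ pvU rows cols e.2.2.2))
          (pvB0 rows cols ^ (L1 * L2)) ?_
        · simpa [pvMu, smul_eq_mul] using hb
        · intro z hz
          rcases List.mem_map.1 hz with ⟨e, _, rfl⟩
          exact Nat.pow_le_pow_right (by rw [hB0]; omega) (hUle e.2.2.2)
      have hlen : init.length = L2 := by
        rw [hinit, List.length_map, PySem.List.length_pyRange_one, hcols]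
        simp
      have hle2 : L2 ≤ pvB0 rows cols := by rw [hB0]; nlinarith
      calc pvMu rows cols init
          ≤ init.length * pvB0 rows cols ^ (L1 * L2) := hbound
        _ = L2 * pvB0 rows cols ^ (L1 * L2) := by rw [hlen]
        _ ≤ pvB0 rows cols * pvB0 rows cols ^ (L1 * L2) :=
            Nat.mul_le_mul_right _ hle2
        _ = pvB0 rows cols ^ (L1 * L2 + 1) := by rw [pow_succ]; ring
        _ = pvFuelA matrix := hfuel.symm
    have hloop := pvLoop_eq matrix rows cols (pvFuelA matrix) (step - 1) init [] []
      h₁ (by simp) hinv hmu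
    simp only [List.append_nil, List.nil_append, List.flatMap_nil] at hloop
    rw [hloop]
    rw [hinit, List.flatMap_map]
    apply pvFlatMap_congr
    intro a _
    rw [pvE_eq_dfs matrix rows cols _ _ _ _ (pvIdx matrix 0 a) a 0 (by simp [PySem.List.pyGet?_neg_one])]
    rfl
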